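-- pv_equiv track=rewrite | github.com/SeeSense-AK/streamlit-prod | app/pages/actionable_insights.py | analyze_priority_distribution
-- ===== SOURCE A (Python) =====
-- def analyze_priority_distribution(actions):
--     """Analyze the distribution of priority levels"""
--     high = len([a for a in actions if a['priority_level'] == 'High'])
--     medium = len([a for a in actions if a['priority_level'] == 'Medium'])
--     low = len([a for a in actions if a['priority_level'] == 'Low'])
--
--     return {
--         'high': high,
--         'medium': medium,
--         'low': low,
--         'total': len(actions)
--     }
-- ===== SOURCE B (Python) =====
-- def analyze_priority_distribution(actions):
--     """Analyze the distribution of priority levels"""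
--     counts = {}
--     for a in actions:
--         p = a['priority_level']
--         counts[p] = counts.get(p, 0) + 1
--     return {
--         'high': counts.get('High', 0),
--         'medium': counts.get('Medium', 0),
--         'low': counts.get('Low', 0),
--         'total': len(actions)
--     }
-- ===== Notes on version B (the rewrite author's own statement) =====
-- stated objective: simpler
-- what changed: Replaces three separate filtering passes over actions with a single loop that tallies priority levels into a dict, then reads the High/Medium/Low buckets; total stays len(actions).
import Mathlib
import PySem

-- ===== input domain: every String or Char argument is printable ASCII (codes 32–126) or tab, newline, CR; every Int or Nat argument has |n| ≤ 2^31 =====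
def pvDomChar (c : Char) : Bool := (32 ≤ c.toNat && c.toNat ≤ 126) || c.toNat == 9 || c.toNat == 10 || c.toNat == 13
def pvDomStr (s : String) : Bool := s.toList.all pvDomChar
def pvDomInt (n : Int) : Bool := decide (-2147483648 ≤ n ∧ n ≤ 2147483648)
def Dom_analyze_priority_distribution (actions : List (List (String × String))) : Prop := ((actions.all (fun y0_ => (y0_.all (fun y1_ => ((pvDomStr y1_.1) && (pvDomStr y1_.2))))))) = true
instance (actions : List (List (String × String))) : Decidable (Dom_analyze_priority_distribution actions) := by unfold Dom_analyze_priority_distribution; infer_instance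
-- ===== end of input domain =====

-- B changes the algorithm (one tallying pass instead of three filtering passes); equal return value proved on Pre_ (inputs where a['priority_level'] never raises KeyError).

-- ===== PORT A =====
-- a['priority_level'] (first match in the association list; Pre_ guarantees the key is present, so the "" default is never read)
def pvPrio (a : List (String × String)) : String :=
  ((PySem.Dict.mk a).get? "priority_level").getD ""

def analyze_priority_distribution (actions : List (List (String × String))) : List (String × Int) :=
  let high : Int := ((actions.filter (fun a => pvPrio a == "High")).length : Int)
  let medium : Int := ((actions.filter (fun a => pvPrio a == "Medium")).length : Int)
  let low : Int := ((actions.filter (fun a => pvPrio a == "Low")).length : Int)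
  [("high", high), ("medium", medium), ("low", low), ("total", (actions.length : Int))]

-- ===== PORT B =====
def analyze_priority_distribution_alt (actions : List (List (String × String))) : List (String × Int) :=
  let counts : PySem.Dict String Int :=
    actions.foldl (fun d a =>
      let p := pvPrio a
      d.insert p (d.getD p 0 + 1)) PySem.Dict.empty
  [("high", counts.getD "High" 0), ("medium", counts.getD "Medium" 0),
   ("low", counts.getD "Low" 0), ("total", (actions.length : Int))]

-- ===== PRECONDITION & SPEC =====
-- Pre_: every action has the key 'priority_level' — on the others both Pythons raise KeyError.
def Pre_analyze_priority_distribution (actions : List (List (String × String))) : Prop :=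
  (actions.all (fun a => a.any (fun p => p.1 == "priority_level"))) = true
instance (actions : List (List (String × String))) : Decidable (Pre_analyze_priority_distribution actions) := by unfold Pre_analyze_priority_distribution; infer_instance
def pvWitness_analyze_priority_distribution : (List (List (String × String))) :=
  [[("priority_level", "High")], [("priority_level", "Low"), ("id", "3")]]
def Spec_analyze_priority_distribution (actions : List (List (String × String))) (out : List (String × Int)) : Prop := out = analyze_priority_distribution_alt actions
instance (actions : List (List (String × String))) (out : List (String × Int)) : Decidable (Spec_analyze_priority_distribution actions out) := by unfold Spec_analyze_priority_distribution; infer_instance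

-- ===== CLAIM (what is proved, stated in full; the proofs are below) =====
def Claim_equal_analyze_priority_distribution : Prop := ∀ (actions : List (List (String × String))), Dom_analyze_priority_distribution actions → Pre_analyze_priority_distribution actions → Spec_analyze_priority_distribution actions (analyze_priority_distribution actions)

-- ===== LEMMAS AND PROOFS =====
-- B's tally at key v is the length of A's filter at v
theorem pv_count_lemma (actions : List (List (String × String))) (v : String) :
    (actions.foldl (fun d a => d.insert (pvPrio a) (d.getD (pvPrio a) 0 + 1)) PySem.Dict.empty).getD v 0
      = ((actions.filter (fun a => pvPrio a == v)).length : Int) := by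
  have h := List.foldl_map (f := pvPrio) (g := fun (d : PySem.Dict String Int) x => d.insert x (d.getD x 0 + 1)) (l := actions) (init := PySem.Dict.empty)
  rw [← h, PySem.Dict.foldl_insert_getD_add_one_eq_counter, PySem.Dict.getD_counter]
  have : (actions.map pvPrio).count v = (actions.filter (fun a => pvPrio a == v)).length := by
    rw [List.count, List.countP_map, ← List.countP_eq_length_filter]
    rfl
  rw [this]

-- ===== VERDICT (by name: the statement is the Claim_ definition above) =====
theorem analyze_priority_distribution_spec : Claim_equal_analyze_priority_distribution := by
  intro actions _ _
  unfold Spec_analyze_priority_distribution analyze_priority_distribution analyze_priority_distribution_alt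
  simp only [pv_count_lemma]
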